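-- pv_equiv track=rewrite | github.com/allanRoberto/revesbot-final | apps/api/main.py | analisar_estelar
-- ===== SOURCE A (Python) =====
-- from typing import Dict, Any, Optional
-- from typing import List, Any, Dict, List, Tuple, Optional, Set
-- from typing import Dict, Any
-- from typing import List, Dict, Any, Optional
--
-- def analisar_estelar(historico: List[int]) -> Dict:
--     """Análise do padrão Estelar (equivalências)"""
--     candidatos = {}
--     ultimo = historico[0]
--
--     # Espelhos fixos
--     ESPELHOS = {
--         1:10, 10:1, 2:20, 20:2, 3:30, 30:3,
--         6:9, 9:6, 16:19, 19:16, 26:29, 29:26,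
--         13:31, 31:13, 12:21, 21:12, 32:23, 23:32
--     }
--
--     # Roda europeia
--     RODA = [0,32,15,19,4,21,2,25,17,34,6,27,13,36,11,30,8,23,10,5,24,16,33,1,20,14,31,9,22,18,29,7,28,12,35,3,26]
--
--     # 1. Espelhos (peso alto)
--     if ultimo in ESPELHOS:
--         candidatos[ESPELHOS[ultimo]] = candidatos.get(ESPELHOS[ultimo], 0) + 5
--
--     # 2. Vizinhos (peso médio)
--     idx = RODA.index(ultimo) if ultimo in RODA else -1
--     if idx != -1:
--         vizinho_esq = RODA[(idx - 1 + 37) % 37]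
--         vizinho_dir = RODA[(idx + 1) % 37]
--         candidatos[vizinho_esq] = candidatos.get(vizinho_esq, 0) + 3
--         candidatos[vizinho_dir] = candidatos.get(vizinho_dir, 0) + 3
--
--     # 3. Terminal (peso baixo)
--     terminal = ultimo % 10
--     for i in range(37):
--         if i % 10 == terminal and i != ultimo:
--             candidatos[i] = candidatos.get(i, 0) + 1
--
--     # 4. Soma de dígitos
--     soma_ultimo = (ultimo // 10) + (ultimo % 10)
--     for i in range(1, 37):
--         soma_i = (i // 10) + (i % 10)
--         if soma_i == soma_ultimo and i != ultimo:
--             candidatos[i] = candidatos.get(i, 0) + 2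
--
--     # 5. Repetições recentes (últimos 50)
--     contagem = {}
--     for num in historico[1:51]:
--         contagem[num] = contagem.get(num, 0) + 1
--
--     for num, freq in contagem.items():
--         if freq >= 2:
--             candidatos[num] = candidatos.get(num, 0) + freq
--
--     return {"scores": candidatos}
-- ===== SOURCE B (Python) =====
-- def analisar_estelar(historico):
--     """Análise do padrão Estelar (equivalências) — candidate-wise rewrite:
--     first derive the contributing candidate segments, then score each distinct
--     candidate with a pure function instead of accumulating a mutable dict."""
--     ultimo = historico[0]
--
--     ESPELHOS = {
--         1: 10, 10: 1, 2: 20, 20: 2, 3: 30, 30: 3,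
--         6: 9, 9: 6, 16: 19, 19: 16, 26: 29, 29: 26,
--         13: 31, 31: 13, 12: 21, 21: 12, 32: 23, 23: 32
--     }
--     RODA = [0,32,15,19,4,21,2,25,17,34,6,27,13,36,11,30,8,23,10,5,24,16,33,1,20,14,31,9,22,18,29,7,28,12,35,3,26]
--
--     cnt = {}
--     for n in historico[1:51]:
--         cnt[n] = cnt.get(n, 0) + 1
--
--     esp = [ESPELHOS[ultimo]] if ultimo in ESPELHOS else []
--     if ultimo in RODA:
--         i = RODA.index(ultimo)
--         viz = [RODA[(i - 1) % 37], RODA[(i + 1) % 37]]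
--     else:
--         viz = []
--     term = [c for c in range(37) if c % 10 == ultimo % 10 and c != ultimo]
--     soma = [c for c in range(1, 37)
--             if c // 10 + c % 10 == ultimo // 10 + ultimo % 10 and c != ultimo]
--     reps = [n for n, f in cnt.items() if f >= 2]
--
--     def score(c):
--         return (5 * esp.count(c)
--                 + 3 * viz.count(c)
--                 + (1 if c in term else 0)
--                 + (2 if c in soma else 0)
--                 + (cnt[c] if c in reps else 0))
--
--     order = list(dict.fromkeys(esp + viz + term + soma + reps))
--     return {"scores": {c: score(c) for c in order}}
-- ===== Notes on version B (the rewrite author's own statement) =====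
-- stated objective: alternative
-- what changed: A accumulates scores by mutating one candidate dict across five bump passes; B first derives the five contributing candidate segments (mirror, wheel neighbours, terminal, digit-sum, repeats), deduplicates them into the candidate order, and computes each candidate's score with a pure per-candidate function.
import Mathlib
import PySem

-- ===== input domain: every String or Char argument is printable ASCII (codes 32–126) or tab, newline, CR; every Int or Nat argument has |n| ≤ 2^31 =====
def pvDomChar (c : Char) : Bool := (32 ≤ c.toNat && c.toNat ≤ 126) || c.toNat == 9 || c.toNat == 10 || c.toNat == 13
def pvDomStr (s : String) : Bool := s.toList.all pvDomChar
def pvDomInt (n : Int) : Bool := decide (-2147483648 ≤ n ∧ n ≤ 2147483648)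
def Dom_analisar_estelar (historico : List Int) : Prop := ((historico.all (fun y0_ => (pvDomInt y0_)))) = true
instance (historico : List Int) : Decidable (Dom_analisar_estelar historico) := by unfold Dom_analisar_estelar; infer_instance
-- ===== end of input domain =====

-- B rewrites A's five dict-mutating bump passes as: derive the candidate segments, dedup them
-- into the candidate order, and score each candidate with a pure function (objective: alternative).

-- ===== PORT A =====
def pvESPELHOS : PySem.Dict Int Int := PySem.Dict.ofList
  [(1,10),(10,1),(2,20),(20,2),(3,30),(30,3),(6,9),(9,6),(16,19),(19,16),(26,29),(29,26),
   (13,31),(31,13),(12,21),(21,12),(32,23),(23,32)]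
def pvRODA : List Int :=
  [0,32,15,19,4,21,2,25,17,34,6,27,13,36,11,30,8,23,10,5,24,16,33,1,20,14,31,9,22,18,29,7,28,12,35,3,26]

def analisar_estelar (historico : List Int) : List (String × List (Int × Int)) :=
  match PySem.List.pyGet? historico 0 with
  | none => []   -- historico[0] raises IndexError on []; excluded by Pre_
  | some ultimo =>
    let c0 : PySem.Dict Int Int := PySem.Dict.empty
    let c1 := if pvESPELHOS.contains ultimo then
                let m := pvESPELHOS.getD ultimo 0
                c0.insert m (c0.getD m 0 + 5)
              else c0
    let idx : Int := match PySem.List.index? pvRODA ultimo with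
                     | some n => (n : Int)
                     | none => -1
    let c3 := if idx ≠ -1 then
                -- RODA[(idx-1+37)%37] / RODA[(idx+1)%37]: index always in range, pyGetD is exact
                let esq := PySem.List.pyGetD pvRODA (PySem.Int.mod (idx - 1 + 37) 37) 0
                let dir := PySem.List.pyGetD pvRODA (PySem.Int.mod (idx + 1) 37) 0
                let c2 := c1.insert esq (c1.getD esq 0 + 3)
                c2.insert dir (c2.getD dir 0 + 3)
              else c1
    let terminal := PySem.Int.mod ultimo 10
    let c4 := (PySem.List.pyRange 0 37).foldl (fun d i =>
                if PySem.Int.mod i 10 == terminal && i != ultimo then d.insert i (d.getD i 0 + 1) else d) c3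
    let soma_ultimo := PySem.Int.floordiv ultimo 10 + PySem.Int.mod ultimo 10
    let c5 := (PySem.List.pyRange 1 37).foldl (fun d i =>
                if PySem.Int.floordiv i 10 + PySem.Int.mod i 10 == soma_ultimo && i != ultimo then
                  d.insert i (d.getD i 0 + 2) else d) c4
    let contagem : PySem.Dict Int Int := (PySem.List.slice historico (some 1) (some 51)).foldl
                (fun d num => d.insert num (d.getD num 0 + 1)) PySem.Dict.empty
    let c6 := contagem.items.foldl (fun d p =>
                if 2 ≤ p.2 then d.insert p.1 (d.getD p.1 0 + p.2) else d) c5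
    [("scores", c6.items)]

-- ===== PORT B =====
-- pure per-candidate score over the contributing segments (Source B's local `score`)
def pvScoreSeg (esp viz term soma reps : List Int) (cnt : PySem.Dict Int Int) (c : Int) : Int :=
  5 * (esp.count c : Int) + 3 * (viz.count c : Int)
  + (if c ∈ term then 1 else 0) + (if c ∈ soma then 2 else 0)
  + (if c ∈ reps then cnt.getD c 0 else 0)   -- cnt[c]: c ∈ reps guarantees the key is present, so getD is exact

def analisar_estelar_alt (historico : List Int) : List (String × List (Int × Int)) :=
  match PySem.List.pyGet? historico 0 with
  | none => []   -- historico[0] raises IndexError on []; excluded by Pre_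
  | some ultimo =>
    let cnt : PySem.Dict Int Int := (PySem.List.slice historico (some 1) (some 51)).foldl
                 (fun d num => d.insert num (d.getD num 0 + 1)) PySem.Dict.empty
    let esp : List Int := if pvESPELHOS.contains ultimo then [pvESPELHOS.getD ultimo 0] else []
    let viz : List Int := match PySem.List.index? pvRODA ultimo with
      | some i => [PySem.List.pyGetD pvRODA (PySem.Int.mod ((i : Int) - 1) 37) 0,
                   PySem.List.pyGetD pvRODA (PySem.Int.mod ((i : Int) + 1) 37) 0]
      | none => []
    let term := (PySem.List.pyRange 0 37).filter (fun c =>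
                  PySem.Int.mod c 10 == PySem.Int.mod ultimo 10 && c != ultimo)
    let soma := (PySem.List.pyRange 1 37).filter (fun c =>
                  PySem.Int.floordiv c 10 + PySem.Int.mod c 10
                    == PySem.Int.floordiv ultimo 10 + PySem.Int.mod ultimo 10 && c != ultimo)
    let reps := (cnt.items.filter (fun p => 2 ≤ p.2)).map Prod.fst
    let order := PySem.List.dedup (esp ++ viz ++ term ++ soma ++ reps)   -- dict.fromkeys
    [("scores", order.map (fun c => (c, pvScoreSeg esp viz term soma reps cnt c)))]

-- ===== PRECONDITION & SPEC =====
-- Pre_ excludes only the empty list, on which historico[0] raises IndexError in A (and in B).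
def Pre_analisar_estelar (historico : List Int) : Prop := historico ≠ []
instance (historico : List Int) : Decidable (Pre_analisar_estelar historico) := by
  unfold Pre_analisar_estelar; infer_instance
def pvWitness_analisar_estelar : List Int := [1, 2, 2]

def Spec_analisar_estelar (historico : List Int) (out : List (String × List (Int × Int))) : Prop :=
  out = analisar_estelar_alt historico
instance (historico : List Int) (out : List (String × List (Int × Int))) :
    Decidable (Spec_analisar_estelar historico out) := by unfold Spec_analisar_estelar; infer_instance

-- ===== CLAIM (what is proved, stated in full; the proofs are below) =====
def Claim_equal_analisar_estelar : Prop := ∀ (historico : List Int), Dom_analisar_estelar historico →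
  Pre_analisar_estelar historico → Spec_analisar_estelar historico (analisar_estelar historico)

-- ===== LEMMAS AND PROOFS =====

-- one score-bump step candidatos[k] = candidatos.get(k,0) + w
def pvBump (d : PySem.Dict Int Int) (p : Int × Int) : PySem.Dict Int Int :=
  d.insert p.1 (d.getD p.1 0 + p.2)

-- total weight contributed to key k by the event list E
def pvW (E : List (Int × Int)) (k : Int) : Int :=
  ((E.filter (fun p => p.1 == k)).map Prod.snd).sum

-- named pieces of both ports, used only by the proofs
def pvCnt (xs : List Int) : PySem.Dict Int Int :=
  xs.foldl (fun d num => d.insert num (d.getD num 0 + 1)) PySem.Dict.empty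
def pvEsp (ultimo : Int) : List Int :=
  if pvESPELHOS.contains ultimo then [pvESPELHOS.getD ultimo 0] else []
def pvViz (ultimo : Int) : List Int :=
  match PySem.List.index? pvRODA ultimo with
  | some i => [PySem.List.pyGetD pvRODA (PySem.Int.mod ((i : Int) - 1) 37) 0,
               PySem.List.pyGetD pvRODA (PySem.Int.mod ((i : Int) + 1) 37) 0]
  | none => []
def pvTerm (ultimo : Int) : List Int :=
  (PySem.List.pyRange 0 37).filter (fun c =>
    PySem.Int.mod c 10 == PySem.Int.mod ultimo 10 && c != ultimo)
def pvSoma (ultimo : Int) : List Int :=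
  (PySem.List.pyRange 1 37).filter (fun c =>
    PySem.Int.floordiv c 10 + PySem.Int.mod c 10
      == PySem.Int.floordiv ultimo 10 + PySem.Int.mod ultimo 10 && c != ultimo)
def pvReps (xs : List Int) : List Int :=
  ((pvCnt xs).items.filter (fun p => 2 ≤ p.2)).map Prod.fst
def pvE (ultimo : Int) (xs : List Int) : List (Int × Int) :=
  (pvEsp ultimo).map (fun x => (x, 5)) ++ (pvViz ultimo).map (fun x => (x, 3))
    ++ (pvTerm ultimo).map (fun x => (x, 1)) ++ (pvSoma ultimo).map (fun x => (x, 2))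
    ++ (pvCnt xs).items.filter (fun p => 2 ≤ p.2)

theorem pvW_nil (k : Int) : pvW [] k = 0 := rfl

theorem pvW_cons (a b k : Int) (E : List (Int × Int)) :
    pvW ((a, b) :: E) k = (if a = k then b else 0) + pvW E k := by
  by_cases h : a = k <;> simp [pvW, h]

theorem pvW_append (E₁ E₂ : List (Int × Int)) (k : Int) :
    pvW (E₁ ++ E₂) k = pvW E₁ k + pvW E₂ k := by
  simp [pvW, List.filter_append]

theorem pvW_map_const (l : List Int) (w k : Int) :
    pvW (l.map (fun x => (x, w))) k = w * (l.count k : Int) := by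
  induction l with
  | nil => simp [pvW]
  | cons x xs ih =>
    rw [List.map_cons, pvW_cons, ih, List.count_cons]
    by_cases h : x = k
    · simp [h]; ring
    · simp [h]

theorem pvW_map_fn (l : List Int) (g : Int → Int) (k : Int) (h : l.Nodup) :
    pvW (l.map (fun x => (x, g x))) k = if k ∈ l then g k else 0 := by
  induction l with
  | nil => simp [pvW]
  | cons x xs ih =>
    rw [List.map_cons, pvW_cons, ih (List.nodup_cons.mp h).2]
    rcases List.nodup_cons.mp h with ⟨hx, _⟩
    by_cases hk : x = k
    · subst hk; simp [hx]
    · simp [hk, Ne.symm hk]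

-- the heart: a fold of bumps over events E, starting from a dict with distinct keys, yields the
-- old items with their accumulated weights added, followed by the fresh keys in first-occurrence
-- order, each with its total weight
theorem pvFoldBump_items (E : List (Int × Int)) (d : PySem.Dict Int Int) (hd : d.keys.Nodup) :
    (E.foldl pvBump d).items
      = d.items.map (fun p => (p.1, p.2 + pvW E p.1))
        ++ ((PySem.Set.ofList (E.map Prod.fst)).filter (fun k => !d.contains k)).map
             (fun k => (k, pvW E k)) := by
  induction E generalizing d with
  | nil =>
    simp [pvW_nil]
  | cons e E ih =>
    obtain ⟨k, w⟩ := e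
    rw [List.foldl_cons]
    have hbump : pvBump d (k, w) = d.insert k (d.getD k 0 + w) := rfl
    by_cases hc : d.contains k
    · have hkeys : (d.insert k (d.getD k 0 + w)).keys = d.keys :=
        PySem.Dict.keys_insert_of_contains d _ hc
      have hnd' : (d.insert k (d.getD k 0 + w)).keys.Nodup := by rw [hkeys]; exact hd
      rw [hbump, ih _ hnd', PySem.Dict.items_insert_of_contains d _ hc]
      have hcont : ∀ y, (d.insert k (d.getD k 0 + w)).contains y = (y == k || d.contains y) :=
        fun y => PySem.Dict.contains_insert d k y _
      congr 1
      · rw [List.map_map]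
        apply List.map_congr_left
        intro p hp
        by_cases hpk : p.1 = k
        · have hpv : d.getD p.1 0 = p.2 :=
            PySem.Dict.getD_of_mem_items d (by simpa using hp) hd 0
          simp only [Function.comp_apply, hpk, beq_self_eq_true, if_true, pvW_cons]
          rw [← hpk, hpv]
          simp [hpk]; ring
        · simp only [Function.comp_apply, pvW_cons]
          have : (p.1 == k) = false := by simp [hpk]
          simp [this]
          exact fun h' => absurd h'.symm hpk
      · rw [List.map_cons, PySem.Set.ofList_cons]
        have hdisc : (PySem.Set.ofList (E.map Prod.fst)).discard k
            = (PySem.Set.ofList (E.map Prod.fst)).filter (fun y => !(y == k)) := by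
          simp [PySem.Set.discard]
        rw [List.filter_cons]
        simp only [hc, Bool.not_true, Bool.false_eq_true, if_false, hdisc, List.filter_filter]
        have hfeq : ((PySem.Set.ofList (E.map Prod.fst)).filter
              (fun y => !(d.insert k (d.getD k 0 + w)).contains y))
            = (PySem.Set.ofList (E.map Prod.fst)).filter (fun y => !d.contains y && !(y == k)) := by
          apply List.filter_congr
          intro y _
          rw [hcont y, Bool.not_or, Bool.and_comm]
        rw [hfeq]
        apply List.map_congr_left
        intro y hy
        have hyk : (y == k) = false := by
          have h2 := (List.mem_filter.mp hy).2
          rcases h' : (y == k) with _ | _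
          · rfl
          · rw [h'] at h2; simp at h2
        have : y ≠ k := by simpa using hyk
        rw [pvW_cons]
        simp [Ne.symm this]
    · have hc' : d.contains k = false := eq_false_of_ne_true hc
      have hkeys : (d.insert k (d.getD k 0 + w)).keys = d.keys ++ [k] :=
        PySem.Dict.keys_insert_of_not_contains d _ hc'
      have hnd' : (d.insert k (d.getD k 0 + w)).keys.Nodup := PySem.Dict.nodup_keys_insert d k _ hd
      have hk_notmem : k ∉ d.keys := by
        intro hmem
        rw [(PySem.Dict.contains_iff_mem_keys d k).mpr hmem] at hc
        exact absurd rfl hc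
      have hv : d.getD k 0 = 0 := PySem.Dict.getD_of_not_contains d 0 hc'
      rw [hbump, ih _ hnd', PySem.Dict.items_insert_of_not_contains d _ hc']
      have hcont : ∀ y, (d.insert k (d.getD k 0 + w)).contains y = (y == k || d.contains y) :=
        fun y => PySem.Dict.contains_insert d k y _
      rw [List.map_append]
      simp only [List.map_cons]
      rw [PySem.Set.ofList_cons, List.filter_cons]
      simp only [hc', Bool.not_false, if_true, List.map_cons]
      have hdisc : (PySem.Set.ofList (E.map Prod.fst)).discard k
          = (PySem.Set.ofList (E.map Prod.fst)).filter (fun y => !(y == k)) := by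
        simp [PySem.Set.discard]
      rw [hdisc, List.filter_filter]
      have hfeq : ((PySem.Set.ofList (E.map Prod.fst)).filter
            (fun y => !(d.insert k (d.getD k 0 + w)).contains y))
          = (PySem.Set.ofList (E.map Prod.fst)).filter (fun y => !d.contains y && !(y == k)) := by
        apply List.filter_congr
        intro y _
        rw [hcont y, Bool.not_or, Bool.and_comm]
      rw [hfeq]
      have htail : ∀ l : List Int, (l.filter (fun y => !d.contains y && !(y == k))).map
            (fun y => (y, pvW E y))
          = (l.filter (fun y => !d.contains y && !(y == k))).map
            (fun y => (y, pvW ((k, w) :: E) y)) := by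
        intro l
        apply List.map_congr_left
        intro y hy
        have hyk : (y == k) = false := by
          have h2 := (List.mem_filter.mp hy).2
          rcases h' : (y == k) with _ | _
          · rfl
          · rw [h'] at h2; simp at h2
        have : y ≠ k := by simpa using hyk
        rw [pvW_cons]
        simp [Ne.symm this]
      rw [htail]
      have hhead : d.items.map (fun p => (p.1, p.2 + pvW E p.1))
          = d.items.map (fun p => (p.1, p.2 + pvW ((k, w) :: E) p.1)) := by
        apply List.map_congr_left
        intro p hp
        have hpk : p.1 ≠ k := by
          intro h'
          exact hk_notmem (h' ▸ PySem.Dict.mem_keys_of_mem_items d hp)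
        rw [pvW_cons]
        simp [Ne.symm hpk]
      have hmid : pvW ((k, w) :: E) k = (d.getD k 0 + w) + pvW E k := by
        rw [pvW_cons, hv]; simp
      simp only [List.map_nil]
      rw [hhead, ← hmid]
      simp [List.append_assoc]

-- step 2: A's if-guarded passes collapse to one bump-fold over the event list pvE
theorem pvChain1 (ultimo : Int) :
    (if pvESPELHOS.contains ultimo then
       (PySem.Dict.empty : PySem.Dict Int Int).insert (pvESPELHOS.getD ultimo 0)
         ((PySem.Dict.empty : PySem.Dict Int Int).getD (pvESPELHOS.getD ultimo 0) 0 + 5)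
     else PySem.Dict.empty)
    = ((pvEsp ultimo).map (fun x => (x, 5))).foldl pvBump PySem.Dict.empty := by
  by_cases h : pvESPELHOS.contains ultimo <;> simp [pvEsp, h, pvBump]

theorem pvMod37 (a : Int) : PySem.Int.mod (a + 37) 37 = PySem.Int.mod a 37 := by
  rw [PySem.Int.mod_eq_emod_of_pos (by norm_num), PySem.Int.mod_eq_emod_of_pos (by norm_num)]
  exact Int.add_emod_right a 37

theorem pvChain2 (ultimo : Int) (d : PySem.Dict Int Int) :
    (if (match PySem.List.index? pvRODA ultimo with
         | some n => (n : Int)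
         | none => -1) ≠ -1 then
       let esq := PySem.List.pyGetD pvRODA
         (PySem.Int.mod ((match PySem.List.index? pvRODA ultimo with
           | some n => (n : Int) | none => -1) - 1 + 37) 37) 0
       let dir := PySem.List.pyGetD pvRODA
         (PySem.Int.mod ((match PySem.List.index? pvRODA ultimo with
           | some n => (n : Int) | none => -1) + 1) 37) 0
       let c2 := d.insert esq (d.getD esq 0 + 3)
       c2.insert dir (c2.getD dir 0 + 3)
     else d)
    = ((pvViz ultimo).map (fun x => (x, 3))).foldl pvBump d := by
  unfold pvViz
  rcases h : PySem.List.index? pvRODA ultimo with _ | n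
  · simp
  · have hne : ((n : Int)) ≠ -1 := by omega
    rw [if_pos hne]
    simp only [List.map_cons, List.map_nil, List.foldl_cons, List.foldl_nil, pvBump]
    rw [pvMod37 ((n : Int) - 1)]

theorem pvChain3 (ultimo : Int) (d : PySem.Dict Int Int) :
    (PySem.List.pyRange 0 37).foldl (fun d i =>
        if PySem.Int.mod i 10 == PySem.Int.mod ultimo 10 && i != ultimo then
          d.insert i (d.getD i 0 + 1) else d) d
    = ((pvTerm ultimo).map (fun x => (x, 1))).foldl pvBump d := by
  rw [PySem.List.foldl_if_eq_foldl_filter, List.foldl_map]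
  rfl

theorem pvChain4 (ultimo : Int) (d : PySem.Dict Int Int) :
    (PySem.List.pyRange 1 37).foldl (fun d i =>
        if PySem.Int.floordiv i 10 + PySem.Int.mod i 10
             == PySem.Int.floordiv ultimo 10 + PySem.Int.mod ultimo 10 && i != ultimo then
          d.insert i (d.getD i 0 + 2) else d) d
    = ((pvSoma ultimo).map (fun x => (x, 2))).foldl pvBump d := by
  rw [PySem.List.foldl_if_eq_foldl_filter, List.foldl_map]
  rfl

theorem pvChain5 (xs : List Int) (d : PySem.Dict Int Int) :
    (pvCnt xs).items.foldl (fun d p =>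
        if 2 ≤ p.2 then d.insert p.1 (d.getD p.1 0 + p.2) else d) d
    = ((pvCnt xs).items.filter (fun p => 2 ≤ p.2)).foldl pvBump d := by
  rw [PySem.List.foldl_ite_eq_foldl_filter]
  rfl

-- step 3: the per-candidate weight of pvE is exactly B's pure score function
theorem pvCnt_eq_counter (xs : List Int) : pvCnt xs = PySem.Dict.counter xs :=
  PySem.Dict.foldl_insert_getD_add_one_eq_counter xs

theorem pvRepsPairs (xs : List Int) :
    (pvCnt xs).items.filter (fun p => 2 ≤ p.2)
      = ((PySem.Set.ofList xs).filter (fun k => 2 ≤ (xs.count k : Int))).map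
          (fun k => (k, (xs.count k : Int))) := by
  rw [pvCnt_eq_counter, PySem.Dict.items_counter, List.filter_map]
  rfl

theorem pvReps_eq (xs : List Int) :
    pvReps xs = (PySem.Set.ofList xs).filter (fun k => 2 ≤ (xs.count k : Int)) := by
  rw [pvReps, pvRepsPairs, List.map_map]
  simp [Function.comp_def]

theorem pvTerm_nodup (ultimo : Int) : (pvTerm ultimo).Nodup :=
  List.Nodup.filter _ (by decide : (PySem.List.pyRange 0 37).Nodup)

theorem pvSoma_nodup (ultimo : Int) : (pvSoma ultimo).Nodup :=
  List.Nodup.filter _ (by decide : (PySem.List.pyRange 1 37).Nodup)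

theorem pvScore_eq (ultimo : Int) (xs : List Int) (k : Int) :
    pvW (pvE ultimo xs) k
      = pvScoreSeg (pvEsp ultimo) (pvViz ultimo) (pvTerm ultimo) (pvSoma ultimo)
          (pvReps xs) (pvCnt xs) k := by
  rw [pvE, pvW_append, pvW_append, pvW_append, pvW_append]
  rw [pvW_map_const, pvW_map_const, pvW_map_const, pvW_map_const]
  rw [pvRepsPairs, pvW_map_fn _ _ _ (List.Nodup.filter _ (PySem.Set.nodup_ofList xs))]
  rw [pvScoreSeg, ← pvReps_eq]
  have hterm : (1 : Int) * ((pvTerm ultimo).count k : Int)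
      = if k ∈ pvTerm ultimo then 1 else 0 := by
    by_cases h : k ∈ pvTerm ultimo
    · rw [List.count_eq_one_of_mem (pvTerm_nodup ultimo) h]; simp [h]
    · rw [List.count_eq_zero_of_not_mem h]; simp [h]
  have hsoma : (2 : Int) * ((pvSoma ultimo).count k : Int)
      = if k ∈ pvSoma ultimo then 2 else 0 := by
    by_cases h : k ∈ pvSoma ultimo
    · rw [List.count_eq_one_of_mem (pvSoma_nodup ultimo) h]; simp [h]
    · rw [List.count_eq_zero_of_not_mem h]; simp [h]
  have hrep : (if k ∈ pvReps xs then (xs.count k : Int) else 0)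
      = if k ∈ pvReps xs then (pvCnt xs).getD k 0 else 0 := by
    rw [pvCnt_eq_counter, PySem.Dict.getD_counter]
  rw [hterm, hsoma, hrep]

-- step 4: assembled core equality between the two ports' payloads
theorem pvCore (ultimo : Int) (xs : List Int) :
    ((pvCnt xs).items.foldl (fun d p =>
        if 2 ≤ p.2 then d.insert p.1 (d.getD p.1 0 + p.2) else d)
      ((PySem.List.pyRange 1 37).foldl (fun d i =>
          if PySem.Int.floordiv i 10 + PySem.Int.mod i 10
               == PySem.Int.floordiv ultimo 10 + PySem.Int.mod ultimo 10 && i != ultimo then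
            d.insert i (d.getD i 0 + 2) else d)
        ((PySem.List.pyRange 0 37).foldl (fun d i =>
            if PySem.Int.mod i 10 == PySem.Int.mod ultimo 10 && i != ultimo then
              d.insert i (d.getD i 0 + 1) else d)
          (if (match PySem.List.index? pvRODA ultimo with
               | some n => (n : Int)
               | none => -1) ≠ -1 then
             let esq := PySem.List.pyGetD pvRODA
               (PySem.Int.mod ((match PySem.List.index? pvRODA ultimo with
                 | some n => (n : Int) | none => -1) - 1 + 37) 37) 0
             let dir := PySem.List.pyGetD pvRODA
               (PySem.Int.mod ((match PySem.List.index? pvRODA ultimo with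
                 | some n => (n : Int) | none => -1) + 1) 37) 0
             let c2 := (if pvESPELHOS.contains ultimo then
                 (PySem.Dict.empty : PySem.Dict Int Int).insert (pvESPELHOS.getD ultimo 0)
                   ((PySem.Dict.empty : PySem.Dict Int Int).getD (pvESPELHOS.getD ultimo 0) 0 + 5)
               else PySem.Dict.empty).insert esq
                 ((if pvESPELHOS.contains ultimo then
                     (PySem.Dict.empty : PySem.Dict Int Int).insert (pvESPELHOS.getD ultimo 0)
                       ((PySem.Dict.empty : PySem.Dict Int Int).getD (pvESPELHOS.getD ultimo 0) 0 + 5)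
                   else PySem.Dict.empty).getD esq 0 + 3)
             c2.insert dir (c2.getD dir 0 + 3)
           else (if pvESPELHOS.contains ultimo then
               (PySem.Dict.empty : PySem.Dict Int Int).insert (pvESPELHOS.getD ultimo 0)
                 ((PySem.Dict.empty : PySem.Dict Int Int).getD (pvESPELHOS.getD ultimo 0) 0 + 5)
             else PySem.Dict.empty))))).items
    = (PySem.List.dedup (pvEsp ultimo ++ pvViz ultimo ++ pvTerm ultimo ++ pvSoma ultimo
         ++ pvReps xs)).map
        (fun c => (c, pvScoreSeg (pvEsp ultimo) (pvViz ultimo) (pvTerm ultimo) (pvSoma ultimo)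
          (pvReps xs) (pvCnt xs) c)) := by
  rw [pvChain1 ultimo, pvChain2 ultimo, pvChain3 ultimo, pvChain4 ultimo, pvChain5 xs]
  rw [← List.foldl_append, ← List.foldl_append, ← List.foldl_append, ← List.foldl_append]
  have h := pvFoldBump_items (pvE ultimo xs)
    PySem.Dict.empty (by rw [PySem.Dict.keys_empty]; exact List.nodup_nil)
  have hassoc : ((pvEsp ultimo).map (fun x => (x, 5)) ++ ((pvViz ultimo).map (fun x => (x, 3))
      ++ ((pvTerm ultimo).map (fun x => (x, 1)) ++ ((pvSoma ultimo).map (fun x => (x, 2))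
      ++ (pvCnt xs).items.filter (fun p => 2 ≤ p.2)))))
      = pvE ultimo xs := by
    rw [pvE]; simp [List.append_assoc]
  rw [hassoc, h]
  have hempty : (PySem.Dict.empty : PySem.Dict Int Int).items = [] := rfl
  rw [hempty, List.map_nil, List.nil_append]
  have hfilter : ((PySem.Set.ofList ((pvE ultimo xs).map Prod.fst)).filter
        (fun k => !(PySem.Dict.empty : PySem.Dict Int Int).contains k))
      = PySem.Set.ofList ((pvE ultimo xs).map Prod.fst) := by
    apply List.filter_eq_self.mpr
    intro y _
    rfl
  rw [hfilter]
  have hfst : (pvE ultimo xs).map Prod.fst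
      = pvEsp ultimo ++ pvViz ultimo ++ pvTerm ultimo ++ pvSoma ultimo ++ pvReps xs := by
    rw [pvE, pvReps]
    simp [List.map_map, Function.comp_def]
  rw [hfst, PySem.List.dedup_eq_ofList]
  apply List.map_congr_left
  intro k _
  rw [pvScore_eq ultimo xs k]

-- ===== VERDICT (by name: the statement is the Claim_ definition above) =====
theorem analisar_estelar_spec : Claim_equal_analisar_estelar := by
  intro historico _ hpre
  unfold Spec_analisar_estelar
  obtain ⟨u, t, rfl⟩ : ∃ u t, historico = u :: t := by
    cases historico with
    | nil => exact absurd rfl hpre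
    | cons a b => exact ⟨a, b, rfl⟩
  have hget : PySem.List.pyGet? (u :: t) 0 = some u := by
    simp [PySem.List.pyGet?, PySem.List.pyIdx?]
  rw [analisar_estelar, analisar_estelar_alt, hget]
  exact congrArg (fun z => [(("scores" : String), z)])
    (pvCore u (PySem.List.slice (u :: t) (some 1) (some 51)))
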